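-- pv_equiv track=rewrite | github.com/ryunada/Coding_Test_Practice | DUDU/Programmers/Lv.1/7.신규아이디추천.py | solution
-- ===== SOURCE A (Python) =====
-- def solution(new_id):
--     answer = ''
--     new_id = new_id.lower() # 1단계
--     for word in new_id:     # 2단계
--         if word.isalnum() or word in '-_.':
--             answer += word
--
--     while '..' in answer:   # 3단계
--         answer = answer.replace('..', '.') # 단계적으로 계속 줄임(.을 만족할 때까지)
--
--     if answer[0] == '.' and len(answer) > 1 :  # 4단계
--         answer = answer[1:]
--     else :
--         answer
--
--     if  answer[-1] == '.' :
--         answer = answer[:-1]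
--     else :
--         answer
--
--     if answer == '' :  # 5단계
--         answer = 'a'
--     else :
--         answer
--
--     if len(answer) >= 16:    # 6단계
--         answer = answer[:15]
--         if answer[-1] == '.':
--             answer = answer[:-1]
--
--     if len(answer) <= 2:     # 7단계
--         answer = answer + answer[-1] * (3-len(answer)) # 3개를 만들어주기 위해서
--     return answer
-- ===== SOURCE B (Python) =====
-- def solution(new_id):
--     out = []
--     for c in new_id.lower():
--         if c.isalnum() or c in '-_.':
--             if c == '.' and out and out[-1] == '.':
--                 continue
--             out.append(c)
--     s = ''.join(out)
--     if len(s) > 1 and s[0] == '.':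
--         s = s[1:]
--     if s.endswith('.'):
--         s = s[:-1]
--     if not s:
--         s = 'a'
--     if len(s) > 15:
--         s = s[:15]
--         if s.endswith('.'):
--             s = s[:-1]
--     if len(s) < 3:
--         s = s + s[-1] * (3 - len(s))
--     return s
-- ===== Notes on version B (the rewrite author's own statement) =====
-- stated objective: alternative
-- what changed: B collapses runs of dots while filtering, in one pass over the lowered string, instead of A's filter loop followed by a while-loop that repeatedly rescans the whole string with a global two-dots-to-one replace; the later strip/truncate/pad stages are kept.
import Mathlib
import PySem

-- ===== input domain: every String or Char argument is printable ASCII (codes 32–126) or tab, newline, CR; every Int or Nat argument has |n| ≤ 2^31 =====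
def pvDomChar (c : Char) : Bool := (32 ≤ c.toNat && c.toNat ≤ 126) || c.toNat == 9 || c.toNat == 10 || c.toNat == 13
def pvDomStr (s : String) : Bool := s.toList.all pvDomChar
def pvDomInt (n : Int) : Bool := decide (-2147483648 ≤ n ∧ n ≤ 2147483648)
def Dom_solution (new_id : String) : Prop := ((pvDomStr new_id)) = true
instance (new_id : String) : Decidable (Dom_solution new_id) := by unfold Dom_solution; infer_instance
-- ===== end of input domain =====

-- B collapses runs of dots inside the single filtering pass instead of A's repeated whole-string
-- two-dots-to-one replace rescans (a different decomposition; return value only — neither mutates its argument).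

-- ===== PORT A =====

-- `answer.replace('..', '.')` specialised to old = "..", new = "." (proved equal to the PySem
-- primitive in replace_eq_repDD below; needed only to justify termination of the while-loop port).
def repDD : List Char → List Char
  | [] => []
  | [c] => [c]
  | a :: b :: t => if a = '.' ∧ b = '.' then '.' :: repDD t else a :: repDD (b :: t)

theorem repDD_length_le (l : List Char) : (repDD l).length ≤ l.length := by
  induction l using repDD.induct with
  | case1 => simp [repDD]
  | case2 c => simp [repDD]
  | case3 a b t h ih => rw [repDD, if_pos h]; simp only [List.length_cons]; omega
  | case4 a b t h ih => rw [repDD, if_neg h]; simp only [List.length_cons] at *; omega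

theorem replace_go_eq_repDD (fuel : Nat) (l acc : List Char) (h : l.length ≤ fuel) :
    PySem.Chars.replace.go ['.', '.'] ['.'] fuel l acc = acc.reverse ++ repDD l := by
  induction fuel generalizing l acc with
  | zero =>
    have : l = [] := by cases l <;> simp_all
    subst this; simp [PySem.Chars.replace.go, repDD]
  | succ n ih =>
    match l with
    | [] => simp [PySem.Chars.replace.go, repDD]
    | c :: t =>
      simp only [PySem.Chars.replace.go]
      by_cases hp : List.isPrefixOf ['.', '.'] (c :: t) = true
      · rw [if_pos hp]
        match t, hp with
        | [], hp => simp [List.isPrefixOf] at hp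
        | b :: t', hp =>
          have hc : c = '.' ∧ b = '.' := by
            have := by simpa [List.isPrefixOf] using hp
            exact ⟨this.1.symm, this.2.symm⟩
          simp only [List.length_cons] at h
          have hdrop : List.drop (['.', '.'] : List Char).length (c :: b :: t') = t' := rfl
          rw [hdrop, ih t' _ (by omega)]
          rw [repDD, if_pos hc]
          simp
      · rw [if_neg hp]
        simp only [List.length_cons] at h
        rw [ih t _ (by omega)]
        have hstep : repDD (c :: t) = c :: repDD t := by
          match t with
          | [] => rfl
          | b :: t' =>
            have hne : ¬ (c = '.' ∧ b = '.') := by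
              intro ⟨h1, h2⟩; subst h1; subst h2; simp [List.isPrefixOf] at hp
            rw [repDD, if_neg hne]
        rw [hstep]; simp

theorem replace_eq_repDD (l : List Char) :
    PySem.Chars.replace l ['.', '.'] ['.'] = repDD l := by
  simpa using replace_go_eq_repDD l.length l []

-- `'..' in answer` as a structural predicate
def hasDD : List Char → Bool
  | [] => false
  | [_] => false
  | a :: b :: t => (a = '.' ∧ b = '.') || hasDD (b :: t)

theorem repDD_length_lt (l : List Char) (h : hasDD l = true) : (repDD l).length < l.length := by
  induction l using repDD.induct with
  | case1 => simp [hasDD] at h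
  | case2 c => simp [hasDD] at h
  | case3 a b t hab ih =>
    have := repDD_length_le t
    rw [repDD, if_pos hab]; simp only [List.length_cons]; omega
  | case4 a b t hab ih =>
    have h' : hasDD (b :: t) = true := by
      simp only [hasDD, Bool.or_eq_true, decide_eq_true_eq] at h ⊢
      tauto
    have := ih h'
    rw [repDD, if_neg hab]; simp only [List.length_cons] at *; omega

theorem isIn_DD_iff (l : List Char) : PySem.Chars.isIn ['.', '.'] l = true ↔ hasDD l = true := by
  rw [PySem.Chars.isIn_iff_infix]
  induction l with
  | nil => constructor <;> intro h <;> simp_all [hasDD]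
  | cons a t ih =>
    rw [List.infix_cons_iff]
    match t with
    | [] =>
      simp only [hasDD]
      constructor
      · rintro (h | h)
        · have := h.length_le; simp at this
        · have := h.length_le; simp at this
      · simp
    | b :: t' =>
      simp only [hasDD, Bool.or_eq_true, decide_eq_true_eq, ← ih]
      constructor
      · rintro (h | h)
        · left
          rw [List.cons_prefix_cons] at h
          obtain ⟨h1, h2⟩ := h
          rw [List.cons_prefix_cons] at h2
          exact ⟨h1.symm, h2.1.symm⟩
        · right; exact h
      · rintro (⟨h1, h2⟩ | h)
        · left; subst h1; subst h2
          rw [List.cons_prefix_cons]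
          exact ⟨rfl, by simp⟩
        · right; exact h

-- the while-loop of step 3: `while '..' in answer: answer = answer.replace('..', '.')`
def collapseA (answer : List Char) : List Char :=
  if PySem.Chars.isIn ['.', '.'] answer = true then
    collapseA (PySem.Chars.replace answer ['.', '.'] ['.'])
  else answer
termination_by answer.length
decreasing_by
  rw [replace_eq_repDD]
  exact repDD_length_lt _ ((isIn_DD_iff _).mp (by assumption))

def solution (new_id : String) : String :=
  let s := PySem.Str.lower new_id
  let answer := s.toList.foldl
    (fun acc word =>
      if PySem.Chars.isalnum word || PySem.Chars.isIn [word] ['-', '_', '.'] then acc ++ [word]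
      else acc) []
  let answer := collapseA answer
  let answer :=
    if PySem.List.pyGet? answer 0 = some '.' ∧ 1 < answer.length then
      PySem.List.slice answer (some 1) none
    else answer
  let answer :=
    if PySem.List.pyGet? answer (-1) = some '.' then PySem.List.slice answer none (some (-1))
    else answer
  let answer := if answer = [] then ['a'] else answer
  let answer :=
    if 16 ≤ answer.length then
      let answer2 := PySem.List.slice answer none (some 15)
      if PySem.List.pyGet? answer2 (-1) = some '.' then PySem.List.slice answer2 none (some (-1))
      else answer2
    else answer
  let answer :=
    if answer.length ≤ 2 then
      answer ++ List.replicate (3 - answer.length) ((PySem.List.pyGet? answer (-1)).getD 'a')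
    else answer
  String.ofList answer

-- ===== PORT B =====
def solution_alt (new_id : String) : String :=
  let core := (PySem.Str.lower new_id).toList.foldl
    (fun acc c =>
      if PySem.Chars.isalnum c || PySem.Chars.isIn [c] ['-', '_', '.'] then
        if c = '.' ∧ acc.getLast? = some '.' then acc else acc ++ [c]
      else acc) []
  let s1 := if 1 < core.length ∧ core.head? = some '.' then core.tail else core
  let s2 := if s1.getLast? = some '.' then s1.dropLast else s1
  let s3 := if s2 = [] then ['a'] else s2
  let s4 :=
    if 15 < s3.length then
      let t := s3.take 15
      if t.getLast? = some '.' then t.dropLast else t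
    else s3
  let s5 :=
    if s4.length < 3 then s4 ++ List.replicate (3 - s4.length) (s4.getLast?.getD 'a') else s4
  String.ofList s5

-- ===== PRECONDITION & SPEC =====
-- Pre_ excludes exactly the inputs all of whose characters are removed by the filtering stage
-- (no alphanumeric, hyphen, underscore or period): there A's bare answer[0] raises IndexError on
-- the empty filtered string.
def Pre_solution (new_id : String) : Prop :=
  new_id.toList.any (fun c =>
    PySem.Chars.isalnum (PySem.Chars.lowerChar c) ||
      PySem.Chars.isIn [PySem.Chars.lowerChar c] ['-', '_', '.']) = true
instance (new_id : String) : Decidable (Pre_solution new_id) := by unfold Pre_solution; infer_instance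
def pvWitness_solution : String := ("...!Bad=ID")

def Spec_solution (new_id : String) (out : String) : Prop := out = solution_alt new_id
instance (new_id : String) (out : String) : Decidable (Spec_solution new_id out) := by unfold Spec_solution; infer_instance

-- ===== CLAIM (what is proved, stated in full; the proofs are below) =====
def Claim_equal_solution : Prop := ∀ (new_id : String), Dom_solution new_id → Pre_solution new_id → Spec_solution new_id (solution new_id)

-- ===== LEMMAS AND PROOFS =====

-- the common abstraction: collapse every run of dots to a single dot
def dedot : List Char → List Char
  | [] => []
  | [c] => [c]
  | a :: b :: t => if a = '.' ∧ b = '.' then dedot (b :: t) else a :: dedot (b :: t)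

theorem dedot_ne_nil (c : Char) (t : List Char) : dedot (c :: t) ≠ [] := by
  induction t generalizing c with
  | nil => simp [dedot]
  | cons b t ih =>
    by_cases h : c = '.' ∧ b = '.'
    · simpa [dedot, h] using ih b
    · simp [dedot, h]

theorem getLast?_cons_ne_nil {a : Char} {l : List Char} (h : l ≠ []) :
    (a :: l).getLast? = l.getLast? := by
  match l with
  | [] => exact absurd rfl h
  | b :: t => exact List.getLast?_cons_cons ..

theorem dedot_getLast? (l : List Char) : (dedot l).getLast? = l.getLast? := by
  induction l using dedot.induct with
  | case1 => rfl
  | case2 c => rfl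
  | case3 a b t h ih => rw [dedot, if_pos h, ih, List.getLast?_cons_cons]
  | case4 a b t h ih =>
    rw [dedot, if_neg h, List.getLast?_cons_cons, ← ih]
    exact getLast?_cons_ne_nil (dedot_ne_nil b t)

theorem repDD_head? (l : List Char) : (repDD l).head? = l.head? := by
  induction l using repDD.induct with
  | case1 => rfl
  | case2 c => rfl
  | case3 a b t h ih => rw [repDD, if_pos h]; simp [h.1]
  | case4 a b t h ih => rw [repDD, if_neg h]; rfl

theorem dedot_cons_congr (a : Char) (u v : List Char) (hh : u.head? = v.head?)
    (hd : dedot u = dedot v) : dedot (a :: u) = dedot (a :: v) := by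
  match u, v with
  | [], [] => rfl
  | [], y :: v' => simp at hh
  | x :: u', [] => simp at hh
  | x :: u', y :: v' =>
    have hxy : x = y := by simpa using hh
    subst hxy
    by_cases h : a = '.' ∧ x = '.'
    · rw [dedot, if_pos h, dedot, if_pos h, hd]
    · rw [dedot, if_neg h, dedot, if_neg h, hd]

theorem dedot_snoc (m : List Char) (c : Char) :
    dedot (m ++ [c]) = if m.getLast? = some '.' ∧ c = '.' then dedot m else dedot m ++ [c] := by
  induction m using dedot.induct with
  | case1 => simp [dedot]
  | case2 a =>
    rcases eq_or_ne a '.' with ha | ha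
    · subst ha
      rcases eq_or_ne c '.' with hc | hc
      · subst hc; simp [dedot]
      · simp [dedot, hc]
    · simp [dedot, ha]
  | case3 a b t h ih =>
    have hl : (a :: b :: t).getLast? = (b :: t).getLast? := List.getLast?_cons_cons ..
    rw [List.cons_append, List.cons_append, dedot, if_pos h, ← List.cons_append, ih, hl,
      dedot, if_pos h]
  | case4 a b t h ih =>
    have hl : (a :: b :: t).getLast? = (b :: t).getLast? := List.getLast?_cons_cons ..
    rw [List.cons_append, List.cons_append, dedot, if_neg h, ← List.cons_append, ih, hl]
    split_ifs
    · rw [dedot, if_neg h]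
    · rw [dedot, if_neg h]; simp

theorem dedot_eq_self_of_not_hasDD (l : List Char) (h : hasDD l = false) : dedot l = l := by
  induction l using dedot.induct with
  | case1 => rfl
  | case2 c => rfl
  | case3 a b t hab ih => simp [hasDD, hab] at h
  | case4 a b t hab ih =>
    have h2 : hasDD (b :: t) = false := by
      simp only [hasDD, Bool.or_eq_false_iff] at h; exact h.2
    rw [dedot, if_neg hab, ih h2]

theorem dedot_repDD (l : List Char) : dedot (repDD l) = dedot l := by
  induction l using repDD.induct with
  | case1 => rfl
  | case2 c => rfl
  | case3 a b t h ih =>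
    obtain ⟨ha, hb⟩ := h; subst ha; subst hb
    rw [repDD, if_pos ⟨rfl, rfl⟩]
    have hr : dedot ('.' :: '.' :: t) = dedot ('.' :: t) := by
      rw [dedot, if_pos ⟨rfl, rfl⟩]
    rw [hr]
    exact dedot_cons_congr '.' (repDD t) t (repDD_head? t) ih
  | case4 a b t h ih =>
    rw [repDD, if_neg h]
    exact dedot_cons_congr a (repDD (b :: t)) (b :: t) (repDD_head? _) ih

theorem collapseA_eq_dedot (l : List Char) : collapseA l = dedot l := by
  induction l using collapseA.induct with
  | case1 l h ih =>
    rw [collapseA, if_pos h, ih, replace_eq_repDD, dedot_repDD]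
  | case2 l h =>
    rw [collapseA, if_neg h]
    refine (dedot_eq_self_of_not_hasDD l ?_).symm
    rcases Bool.eq_false_or_eq_true (hasDD l) with ht | hf
    · exact absurd ((isIn_DD_iff l).mpr ht) h
    · exact hf

-- B's single pass computes dedot of the filtered characters
theorem foldB_eq_dedot_filter (p : Char → Bool) (l m : List Char) :
    l.foldl (fun acc c => if p c then (if c = '.' ∧ acc.getLast? = some '.' then acc else acc ++ [c]) else acc) (dedot m)
      = dedot (m ++ l.filter p) := by
  induction l generalizing m with
  | nil => simp
  | cons c t ih =>
    simp only [List.foldl_cons]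
    by_cases hp : p c = true
    · rw [if_pos hp]
      have step : (if c = '.' ∧ (dedot m).getLast? = some '.' then dedot m else dedot m ++ [c])
          = dedot (m ++ [c]) := by
        rw [dedot_snoc, dedot_getLast?]
        split_ifs with h1 h2 h2
        · rfl
        · exact absurd ⟨h1.2, h1.1⟩ h2
        · exact absurd ⟨h2.2, h2.1⟩ h1
        · rfl
      rw [step, ih (m ++ [c])]
      simp [hp]
    · rw [if_neg hp, ih m]
      simp [hp]

theorem foldB_eq_dedot_filter' (p : Char → Bool) (l : List Char) :
    l.foldl (fun acc c => if p c then (if c = '.' ∧ acc.getLast? = some '.' then acc else acc ++ [c]) else acc) []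
      = dedot (l.filter p) := by
  simpa using foldB_eq_dedot_filter p l []

-- A's filter loop
theorem foldA_eq_filter (p : Char → Bool) (l : List Char) :
    l.foldl (fun acc c => if p c then acc ++ [c] else acc) [] = l.filter p := by
  simpa using PySem.List.foldl_append_if p id l []

theorem pyGet?_zero_eq_head? (l : List Char) : PySem.List.pyGet? l 0 = l.head? := by
  cases l with
  | nil => rfl
  | cons a t => simp [PySem.List.pyGet?, PySem.List.pyIdx?]

theorem pyGet?_neg_one_eq_getLast? (l : List Char) : PySem.List.pyGet? l (-1) = l.getLast? := by
  cases l with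
  | nil => rfl
  | cons a t => simp [PySem.List.pyGet?, PySem.List.pyIdx?, List.getLast?_eq_getElem?]

-- steps 4–7 coincide for ANY core string
theorem tail_eq (k : List Char) :
    (let a1 := if PySem.List.pyGet? k 0 = some '.' ∧ 1 < k.length then PySem.List.slice k (some 1) none else k
     let a2 := if PySem.List.pyGet? a1 (-1) = some '.' then PySem.List.slice a1 none (some (-1)) else a1
     let a3 := if a2 = [] then ['a'] else a2
     let a4 := if 16 ≤ a3.length then
         (let b := PySem.List.slice a3 none (some 15)
          if PySem.List.pyGet? b (-1) = some '.' then PySem.List.slice b none (some (-1)) else b)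
       else a3
     if a4.length ≤ 2 then a4 ++ List.replicate (3 - a4.length) ((PySem.List.pyGet? a4 (-1)).getD 'a') else a4)
    = (let s1 := if 1 < k.length ∧ k.head? = some '.' then k.tail else k
       let s2 := if s1.getLast? = some '.' then s1.dropLast else s1
       let s3 := if s2 = [] then ['a'] else s2
       let s4 := if 15 < s3.length then
           (let t := s3.take 15
            if t.getLast? = some '.' then t.dropLast else t)
         else s3
       if s4.length < 3 then s4 ++ List.replicate (3 - s4.length) (s4.getLast?.getD 'a') else s4) := by
  have hslice1 : PySem.List.slice k (some 1) none = k.tail := by simp [pysem]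
  have hcond : (PySem.List.pyGet? k 0 = some '.' ∧ 1 < k.length) ↔ (1 < k.length ∧ k.head? = some '.') := by
    rw [pyGet?_zero_eq_head?, and_comm]
  simp only [hslice1]
  rw [if_congr hcond rfl rfl]
  generalize (if 1 < k.length ∧ k.head? = some '.' then k.tail else k) = s1
  have h2 : PySem.List.slice s1 none (some (-1)) = s1.dropLast := by simp [pysem]
  rw [pyGet?_neg_one_eq_getLast?, h2]
  generalize (if s1.getLast? = some '.' then s1.dropLast else s1) = s2
  generalize (if s2 = [] then ['a'] else s2) = s3
  have h3 : PySem.List.slice s3 none (some 15) = s3.take 15 := by simp [pysem]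
  have h4 : PySem.List.slice (s3.take 15) none (some (-1)) = (s3.take 15).dropLast := by simp [pysem]
  have hc6 : (16 ≤ s3.length) ↔ (15 < s3.length) := by omega
  simp only [h3, h4, pyGet?_neg_one_eq_getLast?]
  rw [if_congr hc6 rfl rfl]
  generalize (if 15 < s3.length then
      (if (s3.take 15).getLast? = some '.' then (s3.take 15).dropLast else s3.take 15) else s3) = s4
  have hc7 : (s4.length ≤ 2) ↔ (s4.length < 3) := by omega
  rw [if_congr hc7 rfl rfl]

-- ===== VERDICT (by name: the statement is the Claim_ definition above) =====
theorem solution_spec : Claim_equal_solution := by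
  intro new_id _ _
  unfold Spec_solution solution solution_alt
  dsimp only
  rw [foldA_eq_filter, collapseA_eq_dedot, foldB_eq_dedot_filter']
  exact congrArg String.ofList (tail_eq _)
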